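-- pv_equiv track=rewrite | github.com/StegGhost/entity-sandbox-runner | install/engine/closure_engine.py | compute_change_closure
-- ===== SOURCE A (Python) =====
-- def compute_change_closure(state, root_object):
--     seen = set()
--     order = []
--
--     def visit(obj):
--         if obj in seen:
--             return
--         seen.add(obj)
--         order.append(obj)
--         for dep in state["objects"][obj].get("depends_on", []):
--             visit(dep)
--
--     visit(root_object)
--     return order
-- ===== SOURCE B (Python) =====
-- def compute_change_closure(state, root_object):
--     objects = state["objects"]
--     seen = set()
--     order = []
--     stack = [root_object]
--     while stack:
--         obj = stack.pop()
--         if obj in seen: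
--             continue
--         seen.add(obj)
--         order.append(obj)
--         stack.extend(reversed(objects[obj].get("depends_on", [])))
--     return order
-- ===== Notes on version B (the rewrite author's own statement) =====
-- stated objective: idiomatic
-- what changed: Replaces the recursive nested visit() helper (call-stack DFS) with an iterative explicit-stack DFS: pop an object, skip if seen, record it, push its dependencies reversed so they are visited left-to-right; also hoists the state["objects"] lookup out of the loop.
import Mathlib
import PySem

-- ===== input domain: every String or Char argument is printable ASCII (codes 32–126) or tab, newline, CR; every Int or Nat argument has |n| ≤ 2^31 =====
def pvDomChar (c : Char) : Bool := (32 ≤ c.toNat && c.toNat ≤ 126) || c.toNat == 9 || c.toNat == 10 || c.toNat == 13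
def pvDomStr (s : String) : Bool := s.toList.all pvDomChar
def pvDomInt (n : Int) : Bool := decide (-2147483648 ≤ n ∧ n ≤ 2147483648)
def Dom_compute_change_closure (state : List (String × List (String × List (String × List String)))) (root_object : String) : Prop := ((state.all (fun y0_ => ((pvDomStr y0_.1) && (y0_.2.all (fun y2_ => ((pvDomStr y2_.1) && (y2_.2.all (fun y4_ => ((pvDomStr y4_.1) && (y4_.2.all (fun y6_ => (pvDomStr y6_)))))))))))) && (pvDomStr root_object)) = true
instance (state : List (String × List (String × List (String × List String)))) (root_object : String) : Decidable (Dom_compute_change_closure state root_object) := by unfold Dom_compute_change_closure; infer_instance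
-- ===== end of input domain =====

-- B replaces A's recursive nested visit() helper with an iterative explicit-stack DFS
-- (pop, skip if seen, record, push dependencies reversed); same return value on Pre_.

-- ===== PORT A =====
-- state["objects"]  (KeyError when the key is missing: those inputs are excluded by Pre_, the
-- total form returns [] there)
def pvObjs (state : List (String × List (String × List (String × List String)))) : List (String × List (String × List String)) :=
  ((PySem.Dict.mk state).get? "objects").getD []

-- state["objects"][obj].get("depends_on", []) — the dependency list read by BOTH Pythons
-- (KeyError when obj is not a key: excluded by Pre_, the total form returns [] there)
def pvDeps (state : List (String × List (String × List (String × List String)))) (obj : String) : List String :=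
  match (PySem.Dict.mk (pvObjs state)).get? obj with
  | none => []
  | some entry => (PySem.Dict.mk entry).getD "depends_on" []

-- all object names the traversal can ever mention: the root plus every listed dependency
def pvU (state : List (String × List (String × List (String × List String)))) (root_object : String) : List String :=
  root_object :: (pvObjs state).flatMap (fun e => (PySem.Dict.mk e.2).getD "depends_on" [])

-- A's nested 'visit': fuel only bounds the recursion DEPTH; the depth is at most the number of
-- distinct names (each level adds a fresh name to seen), so the fuel used below never runs out
def pvVisitA (state : List (String × List (String × List (String × List String)))) : Nat → String → List String × List String → List String × List String
  | 0, _, st => st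
  | f+1, obj, st =>
      if obj ∈ st.1 then st
      else (pvDeps state obj).foldl (fun st' dep => pvVisitA state f dep st') (PySem.Set.add st.1 obj, st.2 ++ [obj])

def compute_change_closure (state : List (String × List (String × List (String × List String)))) (root_object : String) : List String :=
  (pvVisitA state ((pvU state root_object).length + 1) root_object (PySem.Set.empty, [])).2

-- ===== PORT B =====
-- B's while-loop; the Python stack is represented top-first (Python's pop() from the end = head
-- here, so stack.extend(reversed(deps)) = prepending deps).  fuel bounds the number of loop
-- iterations (= 1 initial element + at most one push per listed dependency), never exhausted below.
def pvLoopB (state : List (String × List (String × List (String × List String)))) : Nat → List String → List String × List String → List String × List String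
  | 0, _, st => st
  | _+1, [], st => st
  | g+1, obj :: stack, st =>
      if obj ∈ st.1 then pvLoopB state g stack st
      else pvLoopB state g (pvDeps state obj ++ stack) (PySem.Set.add st.1 obj, st.2 ++ [obj])

def pvFuelB (state : List (String × List (String × List (String × List String)))) (root_object : String) : Nat :=
  (((PySem.List.dedup (pvU state root_object)).map (fun x => (pvDeps state x).length)).sum) + 2

def compute_change_closure_alt (state : List (String × List (String × List (String × List String)))) (root_object : String) : List String :=
  (pvLoopB state (pvFuelB state root_object) [root_object] (PySem.Set.empty, [])).2

-- ===== PRECONDITION & SPEC =====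
-- Pre_ excludes the inputs on which A raises KeyError ("objects" missing, or a dereferenced name
-- not a key of it).  It is slightly stronger than A's exact domain: it asks that the root and
-- EVERY listed dependency be keys, while A only dereferences the ones reachable from the root —
-- exact reachability is not a closed-form condition.
def pvPreB (state : List (String × List (String × List (String × List String)))) (root_object : String) : Bool :=
  match (PySem.Dict.mk state).get? "objects" with
  | none => false
  | some objs =>
      ((PySem.Dict.mk objs).get? root_object).isSome
      && objs.all (fun e => ((PySem.Dict.mk e.2).getD "depends_on" ([] : List String)).all
           (fun d => ((PySem.Dict.mk objs).get? d).isSome))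

def Pre_compute_change_closure (state : List (String × List (String × List (String × List String)))) (root_object : String) : Prop :=
  pvPreB state root_object = true
instance (state : List (String × List (String × List (String × List String)))) (root_object : String) : Decidable (Pre_compute_change_closure state root_object) := by unfold Pre_compute_change_closure; infer_instance

def pvWitness_compute_change_closure : (List (String × List (String × List (String × List String)))) × String :=
  ([("objects", [("a", [("depends_on", ["b"])]), ("b", [("depends_on", [])])])], "a")

def Spec_compute_change_closure (state : List (String × List (String × List (String × List String)))) (root_object : String) (out : List String) : Prop := out = compute_change_closure_alt state root_object
instance (state : List (String × List (String × List (String × List String)))) (root_object : String) (out : List String) : Decidable (Spec_compute_change_closure state root_object out) := by unfold Spec_compute_change_closure; infer_instance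

-- ===== CLAIM (what is proved, stated in full; the proofs are below) =====
def Claim_equal_compute_change_closure : Prop := ∀ (state : List (String × List (String × List (String × List String)))) (root_object : String), Dom_compute_change_closure state root_object → Pre_compute_change_closure state root_object → Spec_compute_change_closure state root_object (compute_change_closure state root_object)

-- ===== LEMMAS AND PROOFS =====

-- the measure for A's recursion depth: names of pvU not yet seen
def pvM (state : List (String × List (String × List (String × List String)))) (root_object : String) (seen : List String) : Nat :=
  ((pvU state root_object).filter (fun x => !decide (x ∈ seen))).length

lemma pvSet_add_of_not_mem (s : List String) (x : String) (h : x ∉ s) :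
    PySem.Set.add s x = s ++ [x] := by
  simp [PySem.Set.add, PySem.Set.contains, h]

lemma pvLength_filter_mono {α : Type} (l : List α) (p q : α → Bool)
    (h : ∀ x, p x = true → q x = true) : (l.filter p).length ≤ (l.filter q).length := by
  induction l with
  | nil => simp
  | cons a t ih =>
    by_cases hp : p a = true
    · simp [List.filter, hp, h a hp]; omega
    · simp only [List.filter]
      cases hq : q a <;> simp [hp, List.length_cons] <;> omega

lemma pvM_mono (state : List (String × List (String × List (String × List String)))) (root_object : String)
    (seen seen' : List String) (h : seen ⊆ seen') :
    pvM state root_object seen' ≤ pvM state root_object seen := by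
  apply pvLength_filter_mono
  intro x hx
  simp at hx ⊢
  exact fun hm => hx (h hm)

lemma pvM_le (state : List (String × List (String × List (String × List String)))) (root_object : String)
    (seen : List String) : pvM state root_object seen ≤ (pvU state root_object).length := by
  exact List.length_filter_le _ _

-- filters over 'x ∈ seen ++ [obj]' rewritten to the simp normal form
lemma pvFilter_append_congr (seen : List String) (obj : String) (l : List String) :
    l.filter (fun x => !decide (x ∈ seen ++ [obj]))
      = l.filter (fun x => !decide (x ∈ seen) && !decide (x = obj)) := by
  apply List.filter_congr
  intro x _
  simp

lemma pvFilter_lt (seen : List String) (obj : String) (hs : obj ∉ seen) :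
    ∀ (l : List String), obj ∈ l →
    (l.filter (fun x => !decide (x ∈ seen) && !decide (x = obj))).length
      < (l.filter (fun x => !decide (x ∈ seen))).length := by
  intro l
  induction l with
  | nil => simp
  | cons a t ih =>
    intro hl
    have hmono := pvLength_filter_mono t (fun x => !decide (x ∈ seen) && !decide (x = obj)) (fun x => !decide (x ∈ seen))
      (by intro x hx; simp at hx ⊢; exact hx.1)
    by_cases ha : a = obj
    · subst ha
      simp [List.filter, hs]
      omega
    · rcases List.mem_cons.mp hl with h1 | h2
      · exact absurd h1.symm ha
      · have := ih h2
        simp only [List.filter]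
        by_cases hin : a ∈ seen
        · simp [hin]; omega
        · simp [hin, ha]; omega

lemma pvM_strict (state : List (String × List (String × List (String × List String)))) (root_object : String)
    (seen : List String) (obj : String) (hU : obj ∈ pvU state root_object) (hs : obj ∉ seen) :
    pvM state root_object (PySem.Set.add seen obj) < pvM state root_object seen := by
  unfold pvM
  rw [pvSet_add_of_not_mem seen obj hs, pvFilter_append_congr]
  exact pvFilter_lt seen obj hs _ hU

lemma pvSum_filter_erase (w : String → Nat) (obj : String) (seen : List String) (hs : obj ∉ seen) :
    ∀ (l : List String), l.Nodup → obj ∈ l →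
      ((l.filter (fun x => !decide (x ∈ seen) && !decide (x = obj))).map w).sum + w obj
        = ((l.filter (fun x => !decide (x ∈ seen))).map w).sum := by
  intro l
  induction l with
  | nil => simp
  | cons a t ih =>
    intro hnd hm
    rcases List.nodup_cons.mp hnd with ⟨hat, hndt⟩
    by_cases ha : a = obj
    · subst ha
      have hfeq : t.filter (fun x => !decide (x ∈ seen) && !decide (x = a)) = t.filter (fun x => !decide (x ∈ seen)) := by
        apply List.filter_congr
        intro x hx
        have : x ≠ a := fun e => hat (e ▸ hx)
        simp [this]
      rw [show ((a :: t).filter (fun x => !decide (x ∈ seen) && !decide (x = a))) = t.filter (fun x => !decide (x ∈ seen) && !decide (x = a)) by simp [List.filter]]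
      rw [show ((a :: t).filter (fun x => !decide (x ∈ seen))) = a :: t.filter (fun x => !decide (x ∈ seen)) by simp [List.filter, hs]]
      rw [hfeq]
      simp [Nat.add_comm]
    · rcases List.mem_cons.mp hm with h1 | h2
      · exact absurd h1.symm ha
      · have := ih hndt h2
        simp only [List.filter]
        by_cases hin : a ∈ seen
        · simp [hin]; omega
        · simp [hin, ha]; omega

lemma pvGet?_mk_mem {ν : Type} (l : List (String × ν)) (k : String) (v : ν)
    (h : (PySem.Dict.mk l).get? k = some v) : ∃ e ∈ l, e.2 = v := by
  induction l with
  | nil => simp [PySem.Dict.get?] at h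
  | cons a t ih =>
    rw [PySem.Dict.get?_mk_cons] at h
    by_cases hk : a.1 == k
    · simp [hk] at h
      obtain rfl := h.symm
      exact ⟨a, List.mem_cons_self, rfl⟩
    · simp [hk] at h
      rcases ih h with ⟨e, he, hev⟩
      exact ⟨e, List.mem_cons_of_mem _ he, hev⟩

lemma pvDeps_subset_U (state : List (String × List (String × List (String × List String)))) (root_object : String)
    (obj d : String) (h : d ∈ pvDeps state obj) : d ∈ pvU state root_object := by
  unfold pvDeps at h
  unfold pvU
  cases hg : (PySem.Dict.mk (pvObjs state)).get? obj with
  | none => rw [hg] at h; simp at h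
  | some entry =>
    rw [hg] at h
    rcases pvGet?_mk_mem _ _ _ hg with ⟨e, he, hev⟩
    apply List.mem_cons_of_mem
    exact List.mem_flatMap.mpr ⟨e, he, by rw [hev]; exact h⟩

lemma pvFoldA_subset_of (state : List (String × List (String × List (String × List String)))) (f : Nat)
    (hv : ∀ (obj : String) (st : List String × List String), st.1 ⊆ (pvVisitA state f obj st).1) :
    ∀ (ds : List String) (st : List String × List String),
      st.1 ⊆ ((ds.foldl (fun st' dep => pvVisitA state f dep st') st)).1 := by
  intro ds
  induction ds with
  | nil => intro st; simp
  | cons d t ih =>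
    intro st
    simp only [List.foldl]
    exact List.Subset.trans (hv d st) (ih _)

lemma pvVisitA_subset (state : List (String × List (String × List (String × List String)))) :
    ∀ (f : Nat) (obj : String) (st : List String × List String),
      st.1 ⊆ (pvVisitA state f obj st).1 := by
  intro f
  induction f with
  | zero => intro obj st; simp [pvVisitA]
  | succ f ih =>
    intro obj st
    simp only [pvVisitA]
    split
    · exact fun _ h => h
    · refine List.Subset.trans ?_ (pvFoldA_subset_of state f ih _ _)
      intro x hx
      simp [PySem.Set.mem_add]
      left; exact hx

lemma pvFoldA_fuel_of (state : List (String × List (String × List (String × List String)))) (root_object : String)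
    (f f' : Nat)
    (hv : ∀ (g : Nat) (obj : String) (st : List String × List String),
      pvM state root_object st.1 < f → pvM state root_object st.1 < g →
      obj ∈ pvU state root_object → pvVisitA state f obj st = pvVisitA state g obj st) :
    ∀ (ds : List String) (st : List String × List String),
      pvM state root_object st.1 < f → pvM state root_object st.1 < f' →
      (∀ d ∈ ds, d ∈ pvU state root_object) →
      ds.foldl (fun st' dep => pvVisitA state f dep st') st
        = ds.foldl (fun st' dep => pvVisitA state f' dep st') st := by
  intro ds
  induction ds with
  | nil => intro st _ _ _; rfl
  | cons d t ih =>
    intro st hf hf' hU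
    simp only [List.foldl]
    rw [hv f' d st hf hf' (hU d List.mem_cons_self)]
    have hsub : st.1 ⊆ (pvVisitA state f' d st).1 := pvVisitA_subset state f' d st
    have hm : pvM state root_object (pvVisitA state f' d st).1 ≤ pvM state root_object st.1 :=
      pvM_mono state root_object _ _ hsub
    exact ih _ (lt_of_le_of_lt hm hf) (lt_of_le_of_lt hm hf')
      (fun x hx => hU x (List.mem_cons_of_mem _ hx))

lemma pvVisitA_fuel (state : List (String × List (String × List (String × List String)))) (root_object : String) :
    ∀ (f f' : Nat) (obj : String) (st : List String × List String),
      pvM state root_object st.1 < f → pvM state root_object st.1 < f' →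
      obj ∈ pvU state root_object →
      pvVisitA state f obj st = pvVisitA state f' obj st := by
  intro f
  induction f with
  | zero => intro f' obj st h; omega
  | succ f ih =>
    intro f' obj st hf hf' hU
    cases f' with
    | zero => omega
    | succ g =>
      simp only [pvVisitA]
      split
      · rfl
      · rename_i hnot
        have hs : obj ∉ st.1 := by simpa using hnot
        have hm' : pvM state root_object (PySem.Set.add st.1 obj) < pvM state root_object st.1 :=
          pvM_strict state root_object st.1 obj hU hs
        exact pvFoldA_fuel_of state root_object f g
          (fun g' o s h1 h2 h3 => ih g' o s h1 h2 h3)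
          (pvDeps state obj) (PySem.Set.add st.1 obj, st.2 ++ [obj])
          (by simpa using (by omega : pvM state root_object (PySem.Set.add st.1 obj) < f))
          (by simpa using (by omega : pvM state root_object (PySem.Set.add st.1 obj) < g))
          (fun d hd => pvDeps_subset_U state root_object obj d hd)

-- loop-iteration bound for B
def pvW (state : List (String × List (String × List (String × List String)))) (root_object : String)
    (s seen : List String) : Nat :=
  s.length + (((PySem.List.dedup (pvU state root_object)).filter (fun x => !decide (x ∈ seen))).map
    (fun x => (pvDeps state x).length)).sum

lemma pvMain (state : List (String × List (String × List (String × List String)))) (root_object : String) :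
    ∀ (g : Nat) (s : List String) (st : List String × List String),
      (∀ x ∈ s, x ∈ pvU state root_object) →
      pvW state root_object s st.1 < g →
      pvLoopB state g s st
        = s.foldl (fun st' o => pvVisitA state ((pvU state root_object).length + 1) o st') st := by
  intro g
  induction g with
  | zero => intro s st _ h; omega
  | succ g ih =>
    intro s st hUs hW
    cases s with
    | nil => rfl
    | cons obj s' =>
      have hWc : pvW state root_object (obj :: s') st.1 = pvW state root_object s' st.1 + 1 := by
        unfold pvW; simp [List.length_cons]; omega
      simp only [pvLoopB, List.foldl]
      by_cases hmem : obj ∈ st.1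
      · rw [if_pos hmem]
        rw [show pvVisitA state ((pvU state root_object).length + 1) obj st = st from by
          simp only [pvVisitA]; rw [if_pos hmem]]
        exact ih s' st (fun x hx => hUs x (List.mem_cons_of_mem _ hx)) (by omega)
      · rw [if_neg hmem]
        have hUo : obj ∈ pvU state root_object := hUs obj List.mem_cons_self
        have hsum : (((PySem.List.dedup (pvU state root_object)).filter
              (fun x => !decide (x ∈ PySem.Set.add st.1 obj))).map
              (fun x => (pvDeps state x).length)).sum + (pvDeps state obj).length
            = (((PySem.List.dedup (pvU state root_object)).filter
              (fun x => !decide (x ∈ st.1))).map (fun x => (pvDeps state x).length)).sum := by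
          rw [pvSet_add_of_not_mem st.1 obj hmem, pvFilter_append_congr]
          exact pvSum_filter_erase (fun x => (pvDeps state x).length) obj st.1 hmem _
            (PySem.List.nodup_dedup _) ((PySem.List.mem_dedup _ _).mpr hUo)
        have hW' : pvW state root_object (pvDeps state obj ++ s')
            (PySem.Set.add st.1 obj, st.2 ++ [obj]).1 < g := by
          unfold pvW at hW hWc ⊢
          simp only [List.length_append, List.length_cons] at hW hWc ⊢
          omega
        rw [ih (pvDeps state obj ++ s') (PySem.Set.add st.1 obj, st.2 ++ [obj])
          (fun x hx => by
            rcases List.mem_append.mp hx with h1 | h2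
            · exact pvDeps_subset_U state root_object obj x h1
            · exact hUs x (List.mem_cons_of_mem _ h2)) hW']
        rw [List.foldl_append]
        congr 1
        have hM' : pvM state root_object (PySem.Set.add st.1 obj) < (pvU state root_object).length :=
          lt_of_lt_of_le (pvM_strict state root_object st.1 obj hUo hmem) (pvM_le state root_object st.1)
        rw [show pvVisitA state ((pvU state root_object).length + 1) obj st
            = (pvDeps state obj).foldl
                (fun st' dep => pvVisitA state ((pvU state root_object).length) dep st')
                (PySem.Set.add st.1 obj, st.2 ++ [obj]) from by
          simp only [pvVisitA]; rw [if_neg hmem]]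
        exact (pvFoldA_fuel_of state root_object ((pvU state root_object).length)
          ((pvU state root_object).length + 1)
          (fun g' o st0 h1 h2 h3 => pvVisitA_fuel state root_object _ g' o st0 h1 h2 h3)
          (pvDeps state obj) (PySem.Set.add st.1 obj, st.2 ++ [obj])
          hM' (Nat.lt_succ_of_lt hM') (fun d hd => pvDeps_subset_U state root_object obj d hd)).symm

-- ===== VERDICT (by name: the statement is the Claim_ definition above) =====
theorem compute_change_closure_spec : Claim_equal_compute_change_closure := by
  intro state root_object _dom _pre
  unfold Spec_compute_change_closure compute_change_closure compute_change_closure_alt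
  have hmain := pvMain state root_object (pvFuelB state root_object) [root_object]
    (PySem.Set.empty, ([] : List String))
    (fun x hx => by
      rcases List.mem_singleton.mp hx with rfl
      exact List.mem_cons_self)
    (by
      unfold pvW pvFuelB
      have : (PySem.List.dedup (pvU state root_object)).filter
          (fun x => !decide (x ∈ (PySem.Set.empty : List String))) = PySem.List.dedup (pvU state root_object) := by
        simp [PySem.Set.empty]
      rw [this]
      simp
      omega)
  rw [hmain]
  rfl
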